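-- pv_equiv track=rewrite | github.com/hongkong9771/Data-Structure-and-Algorithm | Code/Pack Problem/Climbing Stairs/爬楼梯进阶版.py | climbStairs_2
-- ===== SOURCE A (Python) =====
-- def climbStairs_2(n, m):
--     """
--     此题可以理解成完全背包：
--     每次爬的1个、2个...m个台阶可以看成是物品的总类，共n阶楼梯可以看成是背包的总容量。
--     因为每次都可以选择爬1阶、2阶...m阶楼梯，此外，1阶、2阶...m阶楼梯是可以重复使用的，因此是完全背包。
--     每次爬1个或者2个台阶的顺序不一样，也被称作不同的方法，因此为排列。所以需要先遍历背包，再遍历物品种类。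
--     """
--     nums = [i for i in range(1, m+1)]
--     dp = [0] * (n + 1)
--
--     # 初始化动态数组
--     dp[0] = 1
--
--     # 动态传递
--     for j in range(1, n+1):
--         for i in range(len(nums)):
--             if nums[i] <= j:
--                 dp[j] = dp[j] + dp[j - nums[i]]
--             else:   # 此块代码可以省略，加上只是为了保证代码的完整性
--                 dp[j] = dp[j]
--     return dp[n]
-- ===== SOURCE B (Python) =====
-- def climbStairs_2(n, m):
--     # Sliding-window running sum: dp[j] = dp[j-1] + ... + dp[j-m] maintained
--     # incrementally, O(n) instead of A's O(n*m) stairs*steps double loop.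
--     dp = [0] * (n + 1)
--     dp[0] = 1
--     if m <= 0:
--         return dp[n]
--     window = 0
--     for j in range(1, n + 1):
--         window += dp[j - 1]
--         if j - 1 - m >= 0:
--             window -= dp[j - 1 - m]
--         dp[j] = window
--     return dp[n]
-- ===== Notes on version B (the rewrite author's own statement) =====
-- stated objective: faster
-- what changed: Replaces A's complete-knapsack double loop over all m step sizes per stair with a single pass maintaining a sliding-window running sum of the last m dp values.
import Mathlib
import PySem

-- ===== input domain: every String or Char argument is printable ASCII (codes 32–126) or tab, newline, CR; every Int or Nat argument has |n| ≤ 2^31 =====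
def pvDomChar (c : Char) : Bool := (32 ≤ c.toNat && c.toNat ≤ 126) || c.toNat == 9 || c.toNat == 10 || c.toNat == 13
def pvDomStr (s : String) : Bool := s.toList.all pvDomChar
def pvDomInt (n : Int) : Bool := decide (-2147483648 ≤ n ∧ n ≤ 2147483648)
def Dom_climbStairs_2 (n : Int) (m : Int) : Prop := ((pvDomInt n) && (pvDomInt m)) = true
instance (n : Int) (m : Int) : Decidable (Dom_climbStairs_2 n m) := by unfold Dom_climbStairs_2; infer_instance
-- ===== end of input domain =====

-- B replaces A's stairs×steps double loop by a single pass keeping a sliding-window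
-- running sum of the last m dp values (objective: faster, asymptotic O(n·m) → O(n)).

-- ===== PORT A =====
-- literal port of A: nums = [1..m]; dp table; for j in 1..n: for i in range(len(nums)): add dp[j-nums[i]]
def climbStairs_2 (n : Int) (m : Int) : Int :=
  let nums : List Int := PySem.List.pyRange 1 (m + 1) 1
  let dp0 : List Int := List.replicate (n + 1).toNat 0
  let dp1 : List Int := PySem.List.pySetD dp0 0 1
  let dp2 : List Int :=
    (PySem.List.pyRange 1 (n + 1) 1).foldl (fun dp j =>
      (PySem.List.pyRange 0 (nums.length : Int) 1).foldl (fun dp i =>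
        if PySem.List.pyGetD nums i 0 ≤ j then
          PySem.List.pySetD dp j
            (PySem.List.pyGetD dp j 0 + PySem.List.pyGetD dp (j - PySem.List.pyGetD nums i 0) 0)
        else
          dp) dp) dp1
  PySem.List.pyGetD dp2 n 0

-- ===== PORT B =====
-- literal port of Source B: dp table plus a running window sum of the last m entries
def climbStairs_2_alt (n : Int) (m : Int) : Int :=
  let dp0 : List Int := List.replicate (n + 1).toNat 0
  let dp1 : List Int := PySem.List.pySetD dp0 0 1
  if m ≤ 0 then
    PySem.List.pyGetD dp1 n 0
  else
    let st : List Int × Int :=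
      (PySem.List.pyRange 1 (n + 1) 1).foldl (fun (st : List Int × Int) j =>
        let dp := st.1
        let w1 := st.2 + PySem.List.pyGetD dp (j - 1) 0
        let w2 := if j - 1 - m ≥ 0 then w1 - PySem.List.pyGetD dp (j - 1 - m) 0 else w1
        (PySem.List.pySetD dp j w2, w2)) (dp1, 0)
    PySem.List.pyGetD st.1 n 0

-- ===== PRECONDITION & SPEC =====
-- Pre_ excludes exactly n < 0, where Python A raises IndexError (dp is empty, dp[0] = 1 fails).
def Pre_climbStairs_2 (n : Int) (m : Int) : Prop := 0 ≤ n
instance (n : Int) (m : Int) : Decidable (Pre_climbStairs_2 n m) := by unfold Pre_climbStairs_2; infer_instance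
def pvWitness_climbStairs_2 : Int × Int := (6, 3)

def Spec_climbStairs_2 (n : Int) (m : Int) (out : Int) : Prop := out = climbStairs_2_alt n m
instance (n : Int) (m : Int) (out : Int) : Decidable (Spec_climbStairs_2 n m out) := by unfold Spec_climbStairs_2; infer_instance

-- ===== CLAIM (what is proved, stated in full; the proofs are below) =====
def Claim_equal_climbStairs_2 : Prop := ∀ (n : Int) (m : Int), Dom_climbStairs_2 n m → Pre_climbStairs_2 n m → Spec_climbStairs_2 n m (climbStairs_2 n m)

-- ===== LEMMAS AND PROOFS =====

-- the mathematical function both programs compute: ordered compositions of j from parts 1..M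
def pvF (M : Nat) : Nat → Int
  | 0 => 1
  | (j + 1) => ∑ i ∈ Finset.range (min M (j + 1)), pvF M (j - i)
decreasing_by exact Nat.lt_succ_of_le (Nat.sub_le j i)

-- the dp table after t outer iterations (length N+1): entries 0..t filled, rest 0
def pvD (M N t : Nat) : List Int :=
  (List.range (N + 1)).map (fun i => if i ≤ t then pvF M i else 0)

lemma pv_getD_map_range (f : Nat → Int) (n k : Nat) (d : Int) (h : k < n) :
    ((List.range n).map f).getD k d = f k := by
  simp [List.getD_eq_getElem?_getD, h]

lemma pv_getD_set_self (l : List Int) (i : Nat) (v d : Int) (h : i < l.length) :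
    (l.set i v).getD i d = v := by
  simp [List.getD_eq_getElem?_getD, h]

lemma pv_getD_set_ne (l : List Int) (i k : Nat) (v d : Int) (h : k ≠ i) :
    (l.set i v).getD k d = l.getD k d := by
  simp [List.getD_eq_getElem?_getD, List.getElem?_set, Ne.symm h]

lemma pvD_length (M N t : Nat) : (pvD M N t).length = N + 1 := by
  simp [pvD]

lemma pvD_getD (M N t i : Nat) (h : i ≤ N) :
    (pvD M N t).getD i 0 = if i ≤ t then pvF M i else 0 :=
  pv_getD_map_range _ _ _ _ (by omega)

lemma pvD_zero (M N : Nat) :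
    pvD M N 0 = (List.replicate (N + 1) (0 : Int)).set 0 1 := by
  apply List.ext_getElem
  · simp [pvD]
  · intro i h1 h2
    simp only [pvD, List.getElem_map, List.getElem_range, List.getElem_set,
      List.getElem_replicate]
    rcases Nat.eq_zero_or_pos i with h | h
    · subst h; simp [pvF]
    · have h0 : ¬ i ≤ 0 := by omega
      have h0' : ¬ (0 = i) := by omega
      simp [h0, h0']

lemma pvD_set (M N t : Nat) (h : t + 1 ≤ N) :
    (pvD M N t).set (t + 1) (pvF M (t + 1)) = pvD M N (t + 1) := by
  apply List.ext_getElem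
  · simp [pvD]
  · intro i h1 h2
    simp only [pvD, List.getElem_set, List.getElem_map, List.getElem_range]
    by_cases hi : t + 1 = i
    · subst hi; simp
    · have e : (i ≤ t + 1) ↔ (i ≤ t) := by omega
      simp [hi, e]

-- list sum over a mapped range = Finset sum
lemma pv_sum_map_range (f : Nat → Int) (n : Nat) :
    (((List.range n).map f).sum) = ∑ i ∈ Finset.range n, f i := by
  induction n with
  | zero => simp
  | succ k ih => simp [List.range_succ, Finset.sum_range_succ, ih]

-- filtering the step list [1..M] by ≤ j keeps exactly [1..min M j]
lemma pv_filter_range (M j : Nat) :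
    (((List.range M).map (fun k : Nat => (1 : Int) + k)).filter
        (fun x => decide (x ≤ (j : Int))))
      = (List.range (min M j)).map (fun k : Nat => (1 : Int) + k) := by
  induction M with
  | zero => simp
  | succ K ih =>
    rw [List.range_succ, List.map_append, List.filter_append, ih]
    by_cases h : K < j
    · have h1 : ((1 : Int) + (K : Int)) ≤ (j : Int) := by push_cast; omega
      have h2 : min (K + 1) j = min K j + 1 := by omega
      have h3 : min K j = K := by omega
      simp [h1, h2, h3, List.range_succ]
    · have h1 : ¬ ((1 : Int) + (K : Int)) ≤ (j : Int) := by push_cast; omega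
      have h2 : min (K + 1) j = min K j := by omega
      simp [h1, h2]

lemma pv_set_getD_self (l : List Int) (j : Nat) (h : j < l.length) :
    l.set j (l.getD j 0) = l := by
  apply List.ext_getElem
  · simp
  · intro i h1 h2
    rw [List.getElem_set]
    by_cases hi : j = i
    · subst hi; simp [List.getD_eq_getElem?_getD, List.getElem?_eq_getElem h]
    · simp [hi]

-- the inner loop of A: adds to dp[j] the sum of dp[j-x] over the steps x ≤ j
lemma pv_innerA (j : Nat) (xs : List Int) :
    ∀ (dp : List Int), (∀ x ∈ xs, 1 ≤ x) → j < dp.length →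
    xs.foldl (fun dp x =>
        if x ≤ (j : Int) then
          dp.set j (dp.getD j 0 + dp.getD ((j : Int) - x).toNat 0)
        else dp) dp
      = dp.set j (dp.getD j 0 +
          ((xs.filter (fun x => decide (x ≤ (j : Int)))).map
            (fun x => dp.getD ((j : Int) - x).toNat 0)).sum) := by
  induction xs with
  | nil =>
    intro dp _ h
    simp only [List.foldl_nil, List.filter_nil, List.map_nil, List.sum_nil, add_zero]
    exact (pv_set_getD_self dp j h).symm
  | cons x rest ih =>
    intro dp hge h
    have hx1 : (1 : Int) ≤ x := hge x List.mem_cons_self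
    by_cases hx : x ≤ (j : Int)
    · have hidx : ∀ y : Int, 1 ≤ y → y ≤ (j : Int) → ((j : Int) - y).toNat ≠ j := by
        intro y h1 h2; omega
      simp only [List.foldl_cons, hx, if_true]
      set dp' := dp.set j (dp.getD j 0 + dp.getD ((j : Int) - x).toNat 0) with hdp'
      have hlen' : j < dp'.length := by simpa [hdp'] using h
      rw [ih dp' (fun y hy => hge y (List.mem_cons_of_mem _ hy)) hlen']
      have hgj : dp'.getD j 0 = dp.getD j 0 + dp.getD ((j : Int) - x).toNat 0 :=
        pv_getD_set_self dp j _ 0 h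
      have hmap :
          (rest.filter (fun x => decide (x ≤ (j : Int)))).map
              (fun y => dp'.getD ((j : Int) - y).toNat 0)
            = (rest.filter (fun x => decide (x ≤ (j : Int)))).map
              (fun y => dp.getD ((j : Int) - y).toNat 0) := by
        apply List.map_congr_left
        intro y hy
        have hy2 := List.of_mem_filter hy
        have hyr := List.mem_of_mem_filter hy
        have hyle : y ≤ (j : Int) := by simpa using hy2
        exact pv_getD_set_ne dp j _ _ 0 (hidx y (hge y (List.mem_cons_of_mem _ hyr)) hyle)
      rw [hmap, hgj, hdp', List.set_set]
      have hfil : ((x :: rest).filter (fun x => decide (x ≤ (j : Int))))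
          = x :: rest.filter (fun x => decide (x ≤ (j : Int))) := by
        simp [List.filter_cons, hx]
      rw [hfil, List.map_cons, List.sum_cons]
      ring_nf
    · simp only [List.foldl_cons, hx, if_false]
      rw [ih dp (fun y hy => hge y (List.mem_cons_of_mem _ hy)) h]
      have hfil : ((x :: rest).filter (fun x => decide (x ≤ (j : Int))))
          = rest.filter (fun x => decide (x ≤ (j : Int))) := by
        simp [List.filter_cons, hx]
      rw [hfil]

-- pvF with no step sizes available
lemma pvF_zero (j : Nat) : pvF 0 j = if j = 0 then 1 else 0 := by
  cases j with
  | zero => simp [pvF]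
  | succ s => simp [pvF]

-- the sliding-window recurrence B uses
lemma pv_sliding (M t : Nat) (hM : 1 ≤ M) :
    pvF M (t + 1) = (if t = 0 then 0 else pvF M t) + pvF M t
      - (if M ≤ t then pvF M (t - M) else 0) := by
  cases t with
  | zero =>
    have h1 : min M 1 = 1 := by omega
    have h2 : ¬ M ≤ 0 := by omega
    simp [pvF, h1, h2]
  | succ s =>
    have hL : pvF M (s + 1 + 1)
        = ∑ i ∈ Finset.range (min M (s + 2)), pvF M (s + 1 - i) := by
      rw [pvF]
    have hR : pvF M (s + 1)
        = ∑ i ∈ Finset.range (min M (s + 1)), pvF M (s - i) := by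
      rw [pvF]
    by_cases hMt : M ≤ s + 1
    · have h1 : min M (s + 2) = M := by omega
      have h2 : min M (s + 1) = M := by omega
      obtain ⟨K, rfl⟩ : ∃ K, M = K + 1 := ⟨M - 1, by omega⟩
      have hpeel : ∑ i ∈ Finset.range (K + 1), pvF (K + 1) (s + 1 - i)
          = (∑ i ∈ Finset.range K, pvF (K + 1) (s - i)) + pvF (K + 1) (s + 1) := by
        rw [Finset.sum_range_succ']
        have e1 : ∀ i ∈ Finset.range K, pvF (K + 1) (s + 1 - (i + 1)) = pvF (K + 1) (s - i) := by
          intro i _; congr 1; omega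
        rw [Finset.sum_congr rfl e1]
        simp
      have hlast : ∑ i ∈ Finset.range (K + 1), pvF (K + 1) (s - i)
          = (∑ i ∈ Finset.range K, pvF (K + 1) (s - i)) + pvF (K + 1) (s + 1 - (K + 1)) := by
        rw [Finset.sum_range_succ]
        congr 2
        omega
      have hsub : (∑ i ∈ Finset.range K, pvF (K + 1) (s - i))
          = pvF (K + 1) (s + 1) - pvF (K + 1) (s + 1 - (K + 1)) := by
        rw [hR, h2, hlast]
        ring
      rw [hL, h1, hpeel, hsub]
      have hc1 : (if K + 1 ≤ s + 1 then pvF (K + 1) (s + 1 - (K + 1)) else 0)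
          = pvF (K + 1) (s + 1 - (K + 1)) := by
        simp [hMt]
      have hc2 : (if s + 1 = 0 then (0 : Int) else pvF (K + 1) (s + 1)) = pvF (K + 1) (s + 1) := by
        simp
      rw [hc1, hc2]
      ring
    · have h1 : min M (s + 2) = s + 2 := by omega
      have h2 : min M (s + 1) = s + 1 := by omega
      have hpeel : ∑ i ∈ Finset.range (s + 2), pvF M (s + 1 - i)
          = (∑ i ∈ Finset.range (s + 1), pvF M (s - i)) + pvF M (s + 1) := by
        rw [Finset.sum_range_succ']
        have e1 : ∀ i ∈ Finset.range (s + 1), pvF M (s + 1 - (i + 1)) = pvF M (s - i) := by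
          intro i _; congr 1; omega
        rw [Finset.sum_congr rfl e1]
        simp
      have hc1 : (if M ≤ s + 1 then pvF M (s + 1 - M) else 0) = 0 := by
        simp [hMt]
      have hc2 : (if s + 1 = 0 then (0 : Int) else pvF M (s + 1)) = pvF M (s + 1) := by
        simp
      rw [hL, h1, hpeel, hc1, hc2, hR, h2]
      ring

-- one outer step of A turns table t into table t+1
lemma pv_stepA (M N t : Nat) (h : t + 1 ≤ N) :
    ((List.range M).map (fun k : Nat => (1 : Int) + k)).foldl
        (fun dp x =>
          if x ≤ ((t + 1 : Nat) : Int) then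
            dp.set (t + 1) (dp.getD (t + 1) 0 + dp.getD (((t + 1 : Nat) : Int) - x).toNat 0)
          else dp) (pvD M N t)
      = pvD M N (t + 1) := by
  have hge : ∀ x ∈ (List.range M).map (fun k : Nat => (1 : Int) + k), (1 : Int) ≤ x := by
    intro x hx
    simp only [List.mem_map, List.mem_range] at hx
    obtain ⟨k, _, rfl⟩ := hx
    omega
  have hlen : t + 1 < (pvD M N t).length := by rw [pvD_length]; omega
  rw [pv_innerA (t + 1) _ (pvD M N t) hge hlen]
  have h0 : (pvD M N t).getD (t + 1) 0 = 0 := by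
    rw [pvD_getD M N t (t + 1) h]
    simp
  rw [h0, pv_filter_range, List.map_map]
  have hmap : ((List.range (min M (t + 1))).map
        ((fun x => (pvD M N t).getD (((t + 1 : Nat) : Int) - x).toNat 0) ∘
          (fun k : Nat => (1 : Int) + k)))
      = (List.range (min M (t + 1))).map (fun k => pvF M (t - k)) := by
    apply List.map_congr_left
    intro k hk
    simp only [List.mem_range] at hk
    have hidx : (((t + 1 : Nat) : Int) - ((1 : Int) + k)).toNat = t - k := by omega
    simp only [Function.comp]
    rw [hidx, pvD_getD M N t (t - k) (by omega)]
    have : t - k ≤ t := Nat.sub_le t k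
    simp [this]
  rw [hmap, pv_sum_map_range]
  have hsum : (0 : Int) + ∑ i ∈ Finset.range (min M (t + 1)), pvF M (t - i) = pvF M (t + 1) := by
    rw [zero_add, pvF]
  rw [hsum, pvD_set M N t h]

-- A's outer loop after K stairs
lemma pv_foldA (M N : Nat) (step : List Int → Nat → List Int)
    (hstep : ∀ t, t + 1 ≤ N → step (pvD M N t) t = pvD M N (t + 1)) :
    ∀ K, K ≤ N → (List.range K).foldl step (pvD M N 0) = pvD M N K := by
  intro K
  induction K with
  | zero => intro _; simp
  | succ L ih =>
    intro hK
    rw [List.range_succ, List.foldl_append, ih (by omega)]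
    simp only [List.foldl_cons, List.foldl_nil]
    exact hstep L hK

-- bridging one outer A step from the PySem form to the set/getD form
lemma pv_stepA_pysem (M N t : Nat) (h : t + 1 ≤ N) :
    (PySem.List.pyRange 0
        ((((List.range M).map (fun k : Nat => (1 : Int) + k)).length : Int)) 1).foldl
      (fun dp i =>
        if PySem.List.pyGetD ((List.range M).map (fun k : Nat => (1 : Int) + k)) i 0
            ≤ (1 : Int) + (t : Int) then
          PySem.List.pySetD dp ((1 : Int) + (t : Int))
            (PySem.List.pyGetD dp ((1 : Int) + (t : Int)) 0 +
              PySem.List.pyGetD dp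
                (((1 : Int) + (t : Int)) -
                  PySem.List.pyGetD ((List.range M).map (fun k : Nat => (1 : Int) + k)) i 0) 0)
        else dp) (pvD M N t)
    = pvD M N (t + 1) := by
  rw [PySem.List.foldl_pyRange_zero_pyGetD'
    ((List.range M).map (fun k : Nat => (1 : Int) + k)) (0 : Int)
    (fun dp x =>
      if x ≤ (1 : Int) + (t : Int) then
        PySem.List.pySetD dp ((1 : Int) + (t : Int))
          (PySem.List.pyGetD dp ((1 : Int) + (t : Int)) 0 +
            PySem.List.pyGetD dp (((1 : Int) + (t : Int)) - x) 0)
      else dp) (pvD M N t)]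
  have hfun : (fun (dp : List Int) (x : Int) =>
      if x ≤ (1 : Int) + (t : Int) then
        PySem.List.pySetD dp ((1 : Int) + (t : Int))
          (PySem.List.pyGetD dp ((1 : Int) + (t : Int)) 0 +
            PySem.List.pyGetD dp (((1 : Int) + (t : Int)) - x) 0)
      else dp)
      = (fun (dp : List Int) (x : Int) =>
        if x ≤ ((t + 1 : Nat) : Int) then
          dp.set (t + 1) (dp.getD (t + 1) 0 + dp.getD (((t + 1 : Nat) : Int) - x).toNat 0)
        else dp) := by
    funext dp x
    have hc : (1 : Int) + (t : Int) = ((t + 1 : Nat) : Int) := by push_cast; ring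
    rw [hc]
    by_cases hx : x ≤ ((t + 1 : Nat) : Int)
    · have h2 : ((t + 1 : Nat) : Int) - x = (((((t + 1 : Nat) : Int) - x).toNat : Nat) : Int) :=
        (Int.toNat_of_nonneg (by omega)).symm
      rw [if_pos hx, if_pos hx, PySem.List.pySetD_natCast, PySem.List.pyGetD_natCast, h2,
        PySem.List.pyGetD_natCast]
      have h3 : max ((t : Int) + 1 - x) 0 = (t : Int) + 1 - x := by omega
      simp [Int.toNat_natCast, h3]
    · rw [if_neg hx, if_neg hx]
  rw [hfun]
  exact pv_stepA M N t h

lemma pv_A_eq (N : Nat) (m : Int) : climbStairs_2 (N : Int) m = pvF m.toNat N := by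
  have hnums : PySem.List.pyRange 1 (m + 1) 1
      = (List.range m.toNat).map (fun k : Nat => (1 : Int) + k) := by
    rw [PySem.List.pyRange_one]
    norm_num
  have houter : PySem.List.pyRange 1 ((N : Int) + 1) 1
      = (List.range N).map (fun k : Nat => (1 : Int) + k) := by
    rw [PySem.List.pyRange_one]
    norm_num
  have hrep : ((N : Int) + 1).toNat = N + 1 := by omega
  have hinit : PySem.List.pySetD (List.replicate (N + 1) (0 : Int)) 0 1 = pvD m.toNat N 0 := by
    rw [pvD_zero, PySem.List.pySetD_of_nonneg]
    · norm_num
    · norm_num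
  simp only [climbStairs_2]
  rw [hnums, hrep, hinit, houter, List.foldl_map]
  rw [pv_foldA m.toNat N _ (fun t ht => pv_stepA_pysem m.toNat N t ht) N (le_refl N)]
  rw [PySem.List.pyGetD_natCast, pvD_getD m.toNat N N N (le_refl N)]
  simp

-- one outer step of B on the (table, window) pair
lemma pv_stepB (M N t : Nat) (hM : 1 ≤ M) (h : t + 1 ≤ N) :
    (fun (st : List Int × Int) (j : Int) =>
      (PySem.List.pySetD st.1 j
          (if j - 1 - (M : Int) ≥ 0 then
            st.2 + PySem.List.pyGetD st.1 (j - 1) 0 - PySem.List.pyGetD st.1 (j - 1 - (M : Int)) 0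
          else st.2 + PySem.List.pyGetD st.1 (j - 1) 0),
        if j - 1 - (M : Int) ≥ 0 then
          st.2 + PySem.List.pyGetD st.1 (j - 1) 0 - PySem.List.pyGetD st.1 (j - 1 - (M : Int)) 0
        else st.2 + PySem.List.pyGetD st.1 (j - 1) 0))
      (pvD M N t, if t = 0 then 0 else pvF M t) ((1 : Int) + (t : Int))
    = (pvD M N (t + 1), pvF M (t + 1)) := by
  have hj1 : (1 : Int) + (t : Int) - 1 = ((t : Nat) : Int) := by push_cast; ring
  have hgt : PySem.List.pyGetD (pvD M N t) ((t : Nat) : Int) 0 = pvF M t := by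
    rw [PySem.List.pyGetD_natCast, pvD_getD M N t t (by omega)]
    simp
  have hw : (if ((1 : Int) + (t : Int)) - 1 - (M : Int) ≥ 0 then
        (if t = 0 then 0 else pvF M t) + PySem.List.pyGetD (pvD M N t) (((1 : Int) + (t : Int)) - 1) 0
          - PySem.List.pyGetD (pvD M N t) (((1 : Int) + (t : Int)) - 1 - (M : Int)) 0
      else (if t = 0 then 0 else pvF M t) + PySem.List.pyGetD (pvD M N t) (((1 : Int) + (t : Int)) - 1) 0)
      = pvF M (t + 1) := by
    rw [hj1, hgt]
    by_cases hMt : M ≤ t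
    · rw [if_pos (by omega)]
      have hidx : ((t : Nat) : Int) - (M : Int) = ((t - M : Nat) : Int) := by omega
      rw [hidx, PySem.List.pyGetD_natCast, pvD_getD M N t (t - M) (by omega)]
      have hle : t - M ≤ t := Nat.sub_le t M
      rw [if_pos hle, pv_sliding M t hM, if_pos hMt]
      all_goals ring
    · rw [if_neg (by omega), pv_sliding M t hM, if_neg hMt]
      ring
  have hc : (1 : Int) + (t : Int) = ((t + 1 : Nat) : Int) := by push_cast; ring
  simp only
  rw [hw, hc, PySem.List.pySetD_natCast, pvD_set M N t h]

-- B's outer loop after K stairs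
lemma pv_foldB (M N : Nat) (step : (List Int × Int) → Nat → (List Int × Int))
    (hstep : ∀ t, t + 1 ≤ N →
      step (pvD M N t, if t = 0 then 0 else pvF M t) t = (pvD M N (t + 1), pvF M (t + 1))) :
    ∀ K, K ≤ N → (List.range K).foldl step (pvD M N 0, 0)
      = (pvD M N K, if K = 0 then 0 else pvF M K) := by
  intro K
  induction K with
  | zero => intro _; simp
  | succ L ih =>
    intro hK
    rw [List.range_succ, List.foldl_append, ih (by omega)]
    simp only [List.foldl_cons, List.foldl_nil]
    rw [hstep L hK]
    simp

lemma pv_B_eq_pos (N M : Nat) (hM : 1 ≤ M) :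
    climbStairs_2_alt (N : Int) ((M : Nat) : Int) = pvF M N := by
  have houter : PySem.List.pyRange 1 ((N : Int) + 1) 1
      = (List.range N).map (fun k : Nat => (1 : Int) + k) := by
    rw [PySem.List.pyRange_one]
    norm_num
  have hrep : ((N : Int) + 1).toNat = N + 1 := by omega
  have hinit : PySem.List.pySetD (List.replicate (N + 1) (0 : Int)) 0 1 = pvD M N 0 := by
    rw [pvD_zero, PySem.List.pySetD_of_nonneg]
    · norm_num
    · norm_num
  have hmpos : ¬ ((M : Int) ≤ 0) := by omega
  simp only [climbStairs_2_alt]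
  rw [hrep, hinit, if_neg hmpos, houter, List.foldl_map]
  rw [pv_foldB M N _ (fun t ht => pv_stepB M N t hM ht) N (le_refl N)]
  rw [PySem.List.pyGetD_natCast, pvD_getD M N N N (le_refl N)]
  simp

lemma pv_B_eq_nonpos (N : Nat) (m : Int) (hm : m ≤ 0) :
    climbStairs_2_alt (N : Int) m = pvF 0 N := by
  have hrep : ((N : Int) + 1).toNat = N + 1 := by omega
  have hinit : PySem.List.pySetD (List.replicate (N + 1) (0 : Int)) 0 1 = pvD 0 N 0 := by
    rw [pvD_zero, PySem.List.pySetD_of_nonneg]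
    · norm_num
    · norm_num
  simp only [climbStairs_2_alt]
  rw [hrep, hinit, if_pos hm, PySem.List.pyGetD_natCast, pvD_getD 0 N 0 N (le_refl N)]
  rcases Nat.eq_zero_or_pos N with hN | hN
  · subst hN; simp
  · have h1 : ¬ N ≤ 0 := by omega
    have h2 : ¬ N = 0 := by omega
    rw [if_neg h1, pvF_zero, if_neg h2]

-- ===== VERDICT (by name: the statement is the Claim_ definition above) =====
theorem climbStairs_2_spec : Claim_equal_climbStairs_2 := by
  intro n m _ hpre
  unfold Spec_climbStairs_2
  obtain ⟨N, rfl⟩ : ∃ N : Nat, n = (N : Int) := ⟨n.toNat, (Int.toNat_of_nonneg hpre).symm⟩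
  by_cases hm : m ≤ 0
  · rw [pv_A_eq, pv_B_eq_nonpos N m hm]
    rw [Int.toNat_of_nonpos hm]
  · obtain ⟨M, rfl⟩ : ∃ M : Nat, m = (M : Int) :=
      ⟨m.toNat, (Int.toNat_of_nonneg (by omega)).symm⟩
    rw [pv_A_eq, pv_B_eq_pos N M (by omega)]
    simp
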